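-- pv_equiv track=rewrite | github.com/Achal13jain/Topic-wise-DSA-Imp-questions-Python | 01. Basic and maths/3. XOR_prop.py | xr
-- ===== SOURCE A (Python) =====
-- def xr(arr):
--     n=len(arr)
--     result=0
--     r2=0
--     for i in range(1,n):
--         result^=i
--         r2^=arr[i]
--     return r2^result
-- ===== SOURCE B (Python) =====
-- def xor_upto(m):
--     # XOR of 1..m (0 if m < 1), closed form by m % 4
--     if m < 1:
--         return 0
--     r = m % 4
--     if r == 0:
--         return m
--     if r == 1:
--         return 1
--     if r == 2:
--         return m + 1
--     return 0
--
-- def xr(arr):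
--     r2 = 0
--     for x in arr[1:]:
--         r2 ^= x
--     return r2 ^ xor_upto(len(arr) - 1)
-- ===== Notes on version B (the rewrite author's own statement) =====
-- stated objective: alternative
-- what changed: The index-XOR loop is replaced by the constant-time closed form for XOR of 1..n-1 (by (n-1) mod 4), leaving a single XOR pass over arr[1:].
import Mathlib
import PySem

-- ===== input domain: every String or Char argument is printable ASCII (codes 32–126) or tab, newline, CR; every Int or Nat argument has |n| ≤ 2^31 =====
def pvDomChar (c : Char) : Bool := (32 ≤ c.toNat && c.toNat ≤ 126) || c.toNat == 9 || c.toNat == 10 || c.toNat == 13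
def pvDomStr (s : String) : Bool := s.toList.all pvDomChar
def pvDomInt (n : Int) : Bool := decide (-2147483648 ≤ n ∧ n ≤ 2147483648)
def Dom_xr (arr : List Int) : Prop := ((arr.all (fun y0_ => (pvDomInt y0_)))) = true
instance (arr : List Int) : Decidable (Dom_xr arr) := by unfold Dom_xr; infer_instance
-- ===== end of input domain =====

-- B replaces A's index-XOR loop by the closed form for XOR of 1..n-1 (by (n-1) mod 4), leaving one XOR pass over arr[1:].

-- ===== PORT A =====
def xr (arr : List Int) : Int :=
  let n : Int := arr.length
  let st := (PySem.List.pyRange 1 n 1).foldl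
      (fun (st : Int × Int) i =>
        (PySem.Int.bxor st.1 i, PySem.Int.bxor st.2 (PySem.List.pyGetD arr i 0)))
      (0, 0)
  PySem.Int.bxor st.2 st.1

-- ===== PORT B =====
def xorUpto (m : Int) : Int :=
  if m < 1 then 0
  else
    let r := PySem.Int.mod m 4
    if r = 0 then m
    else if r = 1 then 1
    else if r = 2 then m + 1
    else 0

def xr_alt (arr : List Int) : Int :=
  let r2 := (PySem.List.slice arr (some 1) none).foldl PySem.Int.bxor 0
  PySem.Int.bxor r2 (xorUpto ((arr.length : Int) - 1))

-- ===== PRECONDITION & SPEC =====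
def Spec_xr (arr : List Int) (out : Int) : Prop := out = xr_alt arr
instance (arr : List Int) (out : Int) : Decidable (Spec_xr arr out) := by unfold Spec_xr; infer_instance

-- ===== CLAIM (what is proved, stated in full; the proofs are below) =====
def Claim_equal_xr : Prop := ∀ (arr : List Int), Dom_xr arr → Spec_xr arr (xr arr)

-- ===== LEMMAS AND PROOFS =====

-- closed form for the XOR of 0..n-1 on Nat
def hNat (n : Nat) : Nat :=
  match n % 4 with
  | 0 => 0
  | 1 => n - 1
  | 2 => 1
  | _ => n

lemma even_xor_succ (m : Nat) (hm : Even m) : m ^^^ (m + 1) = 1 := by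
  rw [← Nat.xor_one_of_even hm, Nat.xor_xor_cancel_left]

lemma hNat_step (n : Nat) : hNat n ^^^ n = hNat (n + 1) := by
  have h4 : n % 4 = 0 ∨ n % 4 = 1 ∨ n % 4 = 2 ∨ n % 4 = 3 := by omega
  rcases h4 with h | h | h | h
  · have h' : (n + 1) % 4 = 1 := by omega
    simp [hNat, h, h']
  · have h' : (n + 1) % 4 = 2 := by omega
    have he : Even (n - 1) := by rw [Nat.even_iff]; omega
    have := even_xor_succ (n - 1) he
    rw [show n - 1 + 1 = n from by omega] at this
    simp only [hNat, h, h']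
    exact this
  · have h' : (n + 1) % 4 = 3 := by omega
    have he : Even n := by rw [Nat.even_iff]; omega
    simp only [hNat, h, h', Nat.xor_comm 1 n, Nat.xor_one_of_even he]
  · have h' : (n + 1) % 4 = 0 := by omega
    simp [hNat, h, h']

lemma range_foldl_xor (n : Nat) : (List.range n).foldl (· ^^^ ·) 0 = hNat n := by
  induction n with
  | zero => rfl
  | succ n ih => rw [List.range_succ, List.foldl_append, ih]; exact hNat_step n

lemma foldl_bxor_cast (l : List Nat) (a : Nat) :
    (l.map (fun (k : Nat) => (Nat.cast k : Int))).foldl PySem.Int.bxor (Nat.cast a)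
      = Nat.cast (l.foldl (· ^^^ ·) a) := by
  induction l generalizing a with
  | nil => rfl
  | cons x xs ih =>
      rw [List.map_cons, List.foldl_cons, List.foldl_cons, PySem.Int.bxor_natCast]
      exact ih (a ^^^ x)

-- A's pair fold splits into two independent folds
lemma pair_fold (arr : List Int) (l : List Int) (a b : Int) :
    (l.foldl (fun (st : Int × Int) i =>
        (PySem.Int.bxor st.1 i, PySem.Int.bxor st.2 (PySem.List.pyGetD arr i 0))) (a, b))
    = (l.foldl PySem.Int.bxor a,
       l.foldl (fun acc i => PySem.Int.bxor acc (PySem.List.pyGetD arr i 0)) b) := by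
  induction l generalizing a b with
  | nil => rfl
  | cons x xs ih => simp only [List.foldl_cons]; exact ih _ _

lemma cast_hNat (n : Nat) (h : 0 < n) : (hNat n : Int) = xorUpto ((n : Int) - 1) := by
  unfold xorUpto
  have h4 : n % 4 = 0 ∨ n % 4 = 1 ∨ n % 4 = 2 ∨ n % 4 = 3 := by omega
  rcases h4 with hc | hc | hc | hc <;>
    · simp only [hNat, hc]
      by_cases hlt : ((n : Int) - 1) < 1
      · simp only [if_pos hlt]; omega
      · rw [if_neg hlt, PySem.Int.mod_eq_emod_of_pos (by norm_num)]
        split_ifs <;> omega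

lemma fst_fold (n : Nat) :
    (PySem.List.pyRange 1 (n : Int) 1).foldl PySem.Int.bxor 0 = xorUpto ((n : Int) - 1) := by
  rcases Nat.eq_zero_or_pos n with h | h
  · subst h
    rw [PySem.List.pyRange_one_eq_nil (by norm_num)]
    simp [xorUpto]
  · have hcons : PySem.List.pyRange 0 (n : Int) 1 = 0 :: PySem.List.pyRange 1 (n : Int) 1 := by
      rw [PySem.List.pyRange_one_cons (by exact_mod_cast h)]; norm_num
    have : (PySem.List.pyRange 0 (n : Int) 1).foldl PySem.Int.bxor 0
        = (PySem.List.pyRange 1 (n : Int) 1).foldl PySem.Int.bxor 0 := by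
      rw [hcons]; simp [List.foldl_cons]
    rw [← this, PySem.List.pyRange_zero_nat n]
    have hc := foldl_bxor_cast (List.range n) 0
    rw [Nat.cast_zero] at hc
    rw [hc, range_foldl_xor, cast_hNat n h]

-- ===== VERDICT (by name: the statement is the Claim_ definition above) =====
theorem xr_spec : Claim_equal_xr := by
  intro arr _
  show PySem.Int.bxor
      ((PySem.List.pyRange 1 (arr.length : Int) 1).foldl
        (fun (st : Int × Int) i =>
          (PySem.Int.bxor st.1 i, PySem.Int.bxor st.2 (PySem.List.pyGetD arr i 0))) (0, 0)).2
      ((PySem.List.pyRange 1 (arr.length : Int) 1).foldl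
        (fun (st : Int × Int) i =>
          (PySem.Int.bxor st.1 i, PySem.Int.bxor st.2 (PySem.List.pyGetD arr i 0))) (0, 0)).1
    = PySem.Int.bxor ((PySem.List.slice arr (some 1) none).foldl PySem.Int.bxor 0)
        (xorUpto ((arr.length : Int) - 1))
  rw [pair_fold, fst_fold arr.length]
  congr 1
  show (PySem.List.pyRange 1 (PySem.List.len arr) 1).foldl
      (fun acc i => PySem.Int.bxor acc (PySem.List.pyGetD arr i 0)) 0
    = (PySem.List.slice arr (some 1) none).foldl PySem.Int.bxor 0
  have h1 := PySem.List.foldl_pyRange_pyGetD (xs := arr) (f := PySem.Int.bxor)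
    (d := 0) (init := 0) (a := 1) (by norm_num)
  rw [h1, PySem.List.slice_from_one]
  norm_num [List.drop_one]
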